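-- pv_equiv track=rewrite | github.com/chethanhr2006/hai | even_odd.py | isnumbers
-- ===== SOURCE A (Python) =====
-- def isnumbers(number):
--     isinteger = True
--
--     for eachinteger in number:
--         if(eachinteger >= "0" and eachinteger <= "9"):
--             continue
--         else:
--             isinteger = False
--             break
--
--     return isinteger
-- ===== SOURCE B (Python) =====
-- def isnumbers(number):
--     return set(number) <= set("0123456789")
-- ===== Notes on version B (the rewrite author's own statement) =====
-- stated objective: idiomatic
-- what changed: Replaces A's early-exit positional scan with building the set of distinct characters and testing subset containment against the literal digit set.
import Mathlib
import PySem

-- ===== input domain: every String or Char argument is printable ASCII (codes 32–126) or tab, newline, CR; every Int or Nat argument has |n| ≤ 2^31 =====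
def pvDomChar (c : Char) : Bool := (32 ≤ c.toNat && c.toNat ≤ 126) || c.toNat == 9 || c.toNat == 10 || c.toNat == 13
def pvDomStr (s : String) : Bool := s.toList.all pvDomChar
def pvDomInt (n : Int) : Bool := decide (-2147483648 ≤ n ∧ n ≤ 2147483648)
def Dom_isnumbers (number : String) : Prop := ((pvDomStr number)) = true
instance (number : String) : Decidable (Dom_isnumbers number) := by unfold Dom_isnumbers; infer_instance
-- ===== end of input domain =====

-- B replaces the early-exit positional scan with a distinct-character set and a subset test against the digit set (idiomatic restructuring, same cost).


-- ===== PORT A =====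
-- for-loop with break over the characters, carrying the isinteger flag
def isnumbersLoop : List Char → Bool
  | [] => true
  | c :: rest => if '0' ≤ c && c ≤ '9' then isnumbersLoop rest else false

def isnumbers (number : String) : Bool := isnumbersLoop number.toList

-- ===== PORT B =====
-- set(number) <= set("0123456789")
def isnumbers_alt (number : String) : Bool :=
  PySem.Set.issubset (PySem.Set.ofList number.toList) (PySem.Set.ofList "0123456789".toList)

-- ===== PRECONDITION & SPEC =====
def Spec_isnumbers (number : String) (out : Bool) : Prop := out = isnumbers_alt number
instance (number : String) (out : Bool) : Decidable (Spec_isnumbers number out) := by unfold Spec_isnumbers; infer_instance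

-- ===== CLAIM (what is proved, stated in full; the proofs are below) =====
def Claim_equal_isnumbers : Prop := ∀ (number : String), Dom_isnumbers number → Spec_isnumbers number (isnumbers number)

-- ===== LEMMAS AND PROOFS =====

-- ===== VERDICT (by name: the statement is the Claim_ definition above) =====
theorem digit_char (c : Char) : c ∈ "0123456789".toList ↔ ('0' ≤ c ∧ c ≤ '9') := by
  have h : "0123456789".toList = ['0','1','2','3','4','5','6','7','8','9'] := by decide
  rw [h]
  simp [Char.le_def, Char.ext_iff, UInt32.le_iff_toNat_le, UInt32.ext_iff]
  omega

theorem alt_eq_all (l : List Char) :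
    PySem.Set.issubset (PySem.Set.ofList l) (PySem.Set.ofList "0123456789".toList)
      = l.all (fun c => '0' ≤ c && c ≤ '9') := by
  rw [Bool.eq_iff_iff, PySem.Set.issubset_iff, List.all_eq_true]
  constructor
  · intro h c hc
    have := h c (by rw [PySem.Set.mem_ofList]; exact hc)
    rw [PySem.Set.mem_ofList] at this
    simpa using (digit_char c).mp this
  · intro h c hc
    rw [PySem.Set.mem_ofList] at hc ⊢
    exact (digit_char c).mpr (by simpa using h c hc)

theorem loop_eq_all (l : List Char) :
    isnumbersLoop l = l.all (fun c => '0' ≤ c && c ≤ '9') := by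
  induction l with
  | nil => rfl
  | cons c rest ih =>
    rw [isnumbersLoop, List.all_cons, ih]
    cases ('0' ≤ c && c ≤ '9') <;> simp

theorem isnumbers_spec : Claim_equal_isnumbers := by
  intro number _
  unfold Spec_isnumbers isnumbers isnumbers_alt
  rw [loop_eq_all, alt_eq_all]
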